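-- pv_equiv track=rewrite | github.com/skysync-web/station-db-awl | app.py | auto_gen_oi
-- ===== SOURCE A (Python) =====
-- ACTUATOR_PLURAL = {
--     "Clamp": "Clamps",
--     "Shift Pin": "Shift Pins",
--     "Swivel Unit": "Swivel Unit",
--     "Linear Unit": "Linear Unit",
-- }
--
-- def make_reserve_dict(start, end):
--     """Create a dict mapping field indices to 'RESERVE'."""
--     return {i: "RESERVE" for i in range(start, end + 1)}
--
-- def auto_gen_oi(station, islands_config):
--     """
--     Generate O_I section comments.
--     Fields _00 to _95, all default RESERVE first.
--     For each island, for each valve, 2 entries (work + rest).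
--     """
--     comments = make_reserve_dict(0, 95)
--     idx = 0
--     for isl_idx, island in enumerate(islands_config, start=1):
--         for v_idx, valve in enumerate(island, start=1):
--             act_type = valve["type"]
--             plural = ACTUATOR_PLURAL.get(act_type, act_type)
--             work = f"O/I {idx:02d} Order Input {plural} at Work position {station}_{isl_idx:02d}V{v_idx:02d}A"
--             rest = f"O/I {idx+1:02d} Order Input {plural} at Rest position {station}_{isl_idx:02d}V{v_idx:02d}B"
--             comments[idx] = work
--             comments[idx + 1] = rest
--             idx += 2
--     return comments
-- ===== SOURCE B (Python) =====
-- ACTUATOR_PLURAL = {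
--     "Clamp": "Clamps",
--     "Shift Pin": "Shift Pins",
--     "Swivel Unit": "Swivel Unit",
--     "Linear Unit": "Linear Unit",
-- }
--
-- def auto_gen_oi(station, islands_config):
--     """
--     Generate O_I section comments, without threading a mutable dict/idx:
--     flatten the valves, then build the whole dict in one comprehension,
--     computing each field's text directly from its index.
--     """
--     triples = [(isl_idx, v_idx, valve["type"])
--                for isl_idx, island in enumerate(islands_config, start=1)
--                for v_idx, valve in enumerate(island, start=1)]
--     n = len(triples)
--
--     def text(idx):
--         if idx >= 2 * n:
--             return "RESERVE"
--         isl_idx, v_idx, act_type = triples[idx // 2]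
--         plural = ACTUATOR_PLURAL.get(act_type, act_type)
--         if idx % 2 == 0:
--             return f"O/I {idx:02d} Order Input {plural} at Work position {station}_{isl_idx:02d}V{v_idx:02d}A"
--         return f"O/I {idx:02d} Order Input {plural} at Rest position {station}_{isl_idx:02d}V{v_idx:02d}B"
--
--     return {idx: text(idx) for idx in range(max(96, 2 * n))}
-- ===== Notes on version B (the rewrite author's own statement) =====
-- stated objective: alternative
-- what changed: B flattens the islands into (isl_idx, v_idx, type) triples and builds the whole 0..max(96,2n) dict in a single comprehension, computing each field's text directly from its index, instead of A's mutable dict of 96 RESERVE entries overwritten in place while threading an idx accumulator through nested loops.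
import Mathlib
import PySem

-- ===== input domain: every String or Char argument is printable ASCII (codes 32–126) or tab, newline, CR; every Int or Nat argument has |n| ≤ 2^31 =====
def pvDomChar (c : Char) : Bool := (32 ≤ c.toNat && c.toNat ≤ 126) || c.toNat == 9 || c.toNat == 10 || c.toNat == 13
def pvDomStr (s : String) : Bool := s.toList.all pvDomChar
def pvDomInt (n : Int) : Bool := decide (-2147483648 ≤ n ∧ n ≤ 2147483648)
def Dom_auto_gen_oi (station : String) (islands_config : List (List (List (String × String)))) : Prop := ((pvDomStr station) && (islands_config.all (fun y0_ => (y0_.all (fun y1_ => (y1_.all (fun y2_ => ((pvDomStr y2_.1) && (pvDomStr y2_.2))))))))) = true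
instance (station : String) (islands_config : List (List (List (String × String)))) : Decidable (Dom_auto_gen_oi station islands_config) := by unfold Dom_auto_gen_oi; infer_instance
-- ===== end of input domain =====

-- B builds the whole result in one comprehension over the index range (each field's
-- text computed from its index) instead of threading a mutable dict+idx accumulator
-- through nested loops: objective 'alternative' (same cost, different decomposition).

-- ===== PORT A =====
-- module constant ACTUATOR_PLURAL (shared by both sources)
def ACTUATOR_PLURAL : PySem.Dict String String :=
  PySem.Dict.mk [("Clamp", "Clamps"), ("Shift Pin", "Shift Pins"),
                 ("Swivel Unit", "Swivel Unit"), ("Linear Unit", "Linear Unit")]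

-- f"{n:02d}" — exact for 0 ≤ n, the only values formatted here (idx, isl_idx, v_idx ≥ 0)
def fmt02 (n : Int) : String :=
  if 0 ≤ n ∧ n < 10 then "0" ++ PySem.Int.toStr n else PySem.Int.toStr n

-- the two f-strings (identical text in both sources; idx is the field index baked into the string)
def workComment (station : String) (idx isl_idx v_idx : Int) (plural : String) : String :=
  "O/I " ++ fmt02 idx ++ " Order Input " ++ plural ++ " at Work position " ++
    station ++ "_" ++ fmt02 isl_idx ++ "V" ++ fmt02 v_idx ++ "A"

def restComment (station : String) (idx isl_idx v_idx : Int) (plural : String) : String :=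
  "O/I " ++ fmt02 idx ++ " Order Input " ++ plural ++ " at Rest position " ++
    station ++ "_" ++ fmt02 isl_idx ++ "V" ++ fmt02 v_idx ++ "B"

-- valve["type"] ; the 'none' (Python KeyError) case is excluded by Pre_ and defaulted to ""
def valveType (valve : List (String × String)) : String :=
  ((PySem.Dict.mk valve).get? "type").getD ""

def make_reserve_dict (start «end» : Int) : PySem.Dict Int String :=
  (PySem.List.pyRange start («end» + 1) 1).foldl (fun d i => d.insert i "RESERVE") PySem.Dict.empty

-- the body of A's inner loop (state = (comments, idx))
def innerStepA (station : String) (isl_idx : Int)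
    (st : PySem.Dict Int String × Int) (vv : Int × List (String × String)) :
    PySem.Dict Int String × Int :=
  let act_type := valveType vv.2
  let plural := ACTUATOR_PLURAL.getD act_type act_type
  let work := workComment station st.2 isl_idx vv.1 plural
  let rest := restComment station (st.2 + 1) isl_idx vv.1 plural
  ((st.1.insert st.2 work).insert (st.2 + 1) rest, st.2 + 2)

def auto_gen_oi (station : String) (islands_config : List (List (List (String × String)))) :
    List (Int × String) :=
  let comments := make_reserve_dict 0 95
  ((PySem.List.enumerate islands_config 1).foldl
      (fun st isl => (PySem.List.enumerate isl.2 1).foldl (innerStepA station isl.1) st)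
      (comments, 0)).1.items

-- ===== PORT B =====
-- flatten: [(isl_idx, v_idx, valve["type"]) for ... for ...] with enumerate(..., start=1) twice
def oiTriples (islands_config : List (List (List (String × String)))) :
    List (Int × Int × String) :=
  (PySem.List.enumerate islands_config 1).flatMap (fun isl =>
    (PySem.List.enumerate isl.2 1).map (fun vv => (isl.1, vv.1, valveType vv.2)))

-- text(idx): the field's string, computed directly from the index
def oiText (station : String) (triples : List (Int × Int × String)) (n idx : Int) : String :=
  if 2 * n ≤ idx then "RESERVE"
  else
    match PySem.List.pyGet? triples (PySem.Int.floordiv idx 2) with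
    | none => "RESERVE"   -- unreachable guard (idx < 2*n keeps the index in range); makes the port total
    | some t =>
      let plural := ACTUATOR_PLURAL.getD t.2.2 t.2.2
      if PySem.Int.mod idx 2 = 0 then workComment station idx t.1 t.2.1 plural
      else restComment station idx t.1 t.2.1 plural

def auto_gen_oi_alt (station : String) (islands_config : List (List (List (String × String)))) :
    List (Int × String) :=
  let triples := oiTriples islands_config
  let n : Int := triples.length
  (PySem.List.pyRange 0 (max 96 (2 * n)) 1).map (fun idx => (idx, oiText station triples n idx))

-- ===== PRECONDITION & SPEC =====
-- Pre_ excludes exactly the inputs where Python A raises KeyError: a valve dict without a "type" key.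
def Pre_auto_gen_oi (station : String) (islands_config : List (List (List (String × String)))) : Prop :=
  islands_config.all (fun island => island.all (fun valve => (PySem.Dict.mk valve).contains "type")) = true

instance (station : String) (islands_config : List (List (List (String × String)))) :
    Decidable (Pre_auto_gen_oi station islands_config) := by unfold Pre_auto_gen_oi; infer_instance

def pvWitness_auto_gen_oi : String × (List (List (List (String × String)))) :=
  ("ST01", [[[("type", "Clamp")], [("type", "Gripper")]], [[("type", "Shift Pin")]]])

def Spec_auto_gen_oi (station : String) (islands_config : List (List (List (String × String)))) (out : List (Int × String)) : Prop := out = auto_gen_oi_alt station islands_config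
instance (station : String) (islands_config : List (List (List (String × String)))) (out : List (Int × String)) : Decidable (Spec_auto_gen_oi station islands_config out) := by unfold Spec_auto_gen_oi; infer_instance

-- ===== CLAIM (what is proved, stated in full; the proofs are below) =====
def Claim_equal_auto_gen_oi : Prop := ∀ (station : String) (islands_config : List (List (List (String × String)))), Dom_auto_gen_oi station islands_config → Pre_auto_gen_oi station islands_config → Spec_auto_gen_oi station islands_config (auto_gen_oi station islands_config)

-- ===== LEMMAS AND PROOFS =====

-- A's step, rephrased on a pre-flattened triple (proof-only helper)
def stepT (station : String) (st : PySem.Dict Int String × Int) (t : Int × Int × String) :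
    PySem.Dict Int String × Int :=
  let plural := ACTUATOR_PLURAL.getD t.2.2 t.2.2
  ((st.1.insert st.2 (workComment station st.2 t.1 t.2.1 plural)).insert
      (st.2 + 1) (restComment station (st.2 + 1) t.1 t.2.1 plural), st.2 + 2)

-- the dict A has built after consuming the triples ts, in B's closed form
def dictOf (station : String) (ts : List (Int × Int × String)) : PySem.Dict Int String :=
  PySem.Dict.mk ((PySem.List.pyRange 0 (max 96 (2 * (ts.length : Int))) 1).map
    (fun j => (j, oiText station ts (ts.length : Int) j)))

lemma flatten_fold (station : String) (cfg : List (List (List (String × String))))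
    (st : PySem.Dict Int String × Int) :
    (PySem.List.enumerate cfg 1).foldl
      (fun st isl => (PySem.List.enumerate isl.2 1).foldl (innerStepA station isl.1) st) st
    = (oiTriples cfg).foldl (stepT station) st := by
  simp only [oiTriples, List.foldl_flatMap, List.foldl_map]
  rfl

lemma insert_map_range (f : Int → String) (M k : Int) (hk0 : 0 ≤ k) (hkM : k < M) (v : String) :
    (PySem.Dict.mk ((PySem.List.pyRange 0 M 1).map (fun j => (j, f j)))).insert k v
    = PySem.Dict.mk ((PySem.List.pyRange 0 M 1).map (fun j => (j, if j = k then v else f j))) := by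
  apply PySem.Dict.ext
  have hc : (PySem.Dict.mk ((PySem.List.pyRange 0 M 1).map (fun j => (j, f j)))).contains k = true := by
    rw [PySem.Dict.contains_mk]
    simp only [List.any_map, List.any_eq_true, Function.comp_apply, beq_iff_eq]
    exact ⟨k, by rw [PySem.List.mem_pyRange_one]; omega, rfl⟩
  rw [PySem.Dict.items_insert_of_contains _ _ hc]
  show List.map _ (List.map _ _) = List.map _ _
  rw [List.map_map]
  apply List.map_congr_left
  intro j hj
  by_cases hjk : j = k <;> simp [hjk]

lemma insert_map_range_top (f : Int → String) (M : Int) (v : String) :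
    (PySem.Dict.mk ((PySem.List.pyRange 0 M 1).map (fun j => (j, f j)))).insert M v
    = PySem.Dict.mk ((PySem.List.pyRange 0 M 1).map (fun j => (j, f j)) ++ [(M, v)]) := by
  apply PySem.Dict.ext
  have hc : (PySem.Dict.mk ((PySem.List.pyRange 0 M 1).map (fun j => (j, f j)))).contains M = false := by
    rw [PySem.Dict.contains_mk]
    simp only [List.any_map, List.any_eq_false, Function.comp_apply, beq_iff_eq]
    intro j hj
    rw [PySem.List.mem_pyRange_one] at hj
    omega
  rw [PySem.Dict.items_insert_of_not_contains _ _ hc]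

lemma oiText_ge (station : String) (ts : List (Int × Int × String)) (n j : Int)
    (h : 2 * n ≤ j) : oiText station ts n j = "RESERVE" := by
  unfold oiText; rw [if_pos h]

lemma oiText_lt (station : String) (ts : List (Int × Int × String)) (t : Int × Int × String)
    (k : Nat) (hk : k < 2 * ts.length) :
    oiText station (ts ++ [t]) ((ts ++ [t]).length : Int) ↑k
    = oiText station ts (ts.length : Int) ↑k := by
  have hfd : PySem.Int.floordiv (k : Int) 2 = ((k / 2 : Nat) : Int) := by
    exact_mod_cast PySem.Int.floordiv_natCast k 2
  have hget : PySem.List.pyGet? (ts ++ [t]) ((k / 2 : Nat) : Int)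
      = PySem.List.pyGet? ts ((k / 2 : Nat) : Int) := by
    rw [PySem.List.pyGet?_natCast, PySem.List.pyGet?_natCast,
      List.getElem?_append_left (by omega)]
  unfold oiText
  rw [hfd, hget,
    if_neg (show ¬(2 * (((ts ++ [t]).length : Nat) : Int) ≤ (k : Int)) by
      simp only [List.length_append, List.length_cons, List.length_nil]; push_cast; omega),
    if_neg (show ¬(2 * ((ts.length : Nat) : Int) ≤ (k : Int)) by omega)]

lemma oiText_work (station : String) (ts : List (Int × Int × String)) (t : Int × Int × String) :
    oiText station (ts ++ [t]) ((ts ++ [t]).length : Int) ↑(2 * ts.length)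
    = workComment station ↑(2 * ts.length) t.1 t.2.1 (ACTUATOR_PLURAL.getD t.2.2 t.2.2) := by
  have hfd : PySem.Int.floordiv ((2 * ts.length : Nat) : Int) 2 = ((ts.length : Nat) : Int) := by
    have h2 : PySem.Int.floordiv ((2 * ts.length : Nat) : Int) 2
        = (((2 * ts.length) / 2 : Nat) : Int) := by
      exact_mod_cast PySem.Int.floordiv_natCast (2 * ts.length) 2
    rw [h2]; congr 1; omega
  have hget : PySem.List.pyGet? (ts ++ [t]) ((ts.length : Nat) : Int) = some t := by
    rw [PySem.List.pyGet?_natCast, List.getElem?_concat_length]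
  have hmod : PySem.Int.mod ((2 * ts.length : Nat) : Int) 2 = 0 := by
    have h2 : PySem.Int.mod ((2 * ts.length : Nat) : Int) 2
        = (((2 * ts.length) % 2 : Nat) : Int) := by
      exact_mod_cast PySem.Int.mod_natCast (2 * ts.length) 2
    rw [h2]; norm_cast; omega
  unfold oiText
  rw [hfd, hget, hmod,
    if_neg (show ¬(2 * (((ts ++ [t]).length : Nat) : Int) ≤ ((2 * ts.length : Nat) : Int)) by
      simp only [List.length_append, List.length_cons, List.length_nil]; push_cast; omega)]
  simp

lemma oiText_rest (station : String) (ts : List (Int × Int × String)) (t : Int × Int × String) :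
    oiText station (ts ++ [t]) ((ts ++ [t]).length : Int) ↑(2 * ts.length + 1)
    = restComment station ↑(2 * ts.length + 1) t.1 t.2.1 (ACTUATOR_PLURAL.getD t.2.2 t.2.2) := by
  have hfd : PySem.Int.floordiv ((2 * ts.length + 1 : Nat) : Int) 2 = ((ts.length : Nat) : Int) := by
    have h2 : PySem.Int.floordiv ((2 * ts.length + 1 : Nat) : Int) 2
        = (((2 * ts.length + 1) / 2 : Nat) : Int) := by
      exact_mod_cast PySem.Int.floordiv_natCast (2 * ts.length + 1) 2
    rw [h2]; congr 1; omega
  have hget : PySem.List.pyGet? (ts ++ [t]) ((ts.length : Nat) : Int) = some t := by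
    rw [PySem.List.pyGet?_natCast, List.getElem?_concat_length]
  have hmod : PySem.Int.mod ((2 * ts.length + 1 : Nat) : Int) 2 = 1 := by
    have h2 : PySem.Int.mod ((2 * ts.length + 1 : Nat) : Int) 2
        = (((2 * ts.length + 1) % 2 : Nat) : Int) := by
      exact_mod_cast PySem.Int.mod_natCast (2 * ts.length + 1) 2
    rw [h2]; norm_cast; omega
  unfold oiText
  rw [hfd, hget, hmod,
    if_neg (show ¬(2 * (((ts ++ [t]).length : Nat) : Int) ≤ ((2 * ts.length + 1 : Nat) : Int)) by
      simp only [List.length_append, List.length_cons, List.length_nil]; push_cast; omega)]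
  simp

lemma main_fold (station : String) (ts : List (Int × Int × String)) :
    ts.foldl (stepT station) (make_reserve_dict 0 95, 0)
    = (dictOf station ts, 2 * (ts.length : Int)) := by
  induction ts using List.reverseRecOn with
  | nil =>
    simp only [List.foldl_nil, List.length_nil, Nat.cast_zero, mul_zero]
    refine Prod.ext ?_ rfl
    apply PySem.Dict.ext
    have hres : (make_reserve_dict 0 95).items
        = (PySem.List.pyRange 0 96 1).map (fun a => (a, "RESERVE")) := by
      unfold make_reserve_dict
      have h := PySem.Dict.items_foldl_insert_fresh (PySem.List.pyRange 0 (95 + 1) 1)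
        (fun a => a) (fun _ => "RESERVE") PySem.Dict.empty
        (fun a _ => PySem.Dict.contains_empty a)
        (by simpa using PySem.List.nodup_pyRange_one 0 (95 + 1))
      simpa using h
    rw [hres]
    show _ = (PySem.Dict.mk ((PySem.List.pyRange 0 (max 96 (2 * ((0:Nat) : Int))) 1).map
      (fun j => (j, oiText station [] ((0:Nat) : Int) j)))).items
    have hmax : max (96:Int) (2 * ((0:Nat) : Int)) = 96 := by norm_num
    rw [hmax]
    show _ = (PySem.List.pyRange 0 96 1).map (fun j => (j, oiText station [] 0 j))
    apply List.map_congr_left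
    intro j hj
    rw [PySem.List.mem_pyRange_one] at hj
    rw [oiText_ge station [] 0 j (by omega)]
  | append_singleton ts t ih =>
    rw [List.foldl_append, ih, List.foldl_cons, List.foldl_nil]
    have hlen : (((ts ++ [t]).length : Nat) : Int) = (ts.length : Int) + 1 := by
      simp only [List.length_append, List.length_cons, List.length_nil]; push_cast; ring
    refine Prod.ext ?_ (by show 2 * (ts.length : Int) + 1 + 1 = _; rw [hlen]; ring)
    show ((dictOf station ts).insert (2 * (ts.length : Int))
        (workComment station (2 * (ts.length : Int)) t.1 t.2.1 (ACTUATOR_PLURAL.getD t.2.2 t.2.2))).insert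
        (2 * (ts.length : Int) + 1)
        (restComment station (2 * (ts.length : Int) + 1) t.1 t.2.1 (ACTUATOR_PLURAL.getD t.2.2 t.2.2))
      = dictOf station (ts ++ [t])
    set m : Int := (ts.length : Int) with hm
    have hm0 : 0 ≤ m := by positivity
    have hw : oiText station (ts ++ [t]) ((ts ++ [t]).length : Int) (2 * m)
        = workComment station (2 * m) t.1 t.2.1 (ACTUATOR_PLURAL.getD t.2.2 t.2.2) := by
      have hc : ((2 * ts.length : Nat) : Int) = 2 * m := by push_cast; ring
      have := oiText_work station ts t
      rwa [hc] at this
    have hr : oiText station (ts ++ [t]) ((ts ++ [t]).length : Int) (2 * m + 1)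
        = restComment station (2 * m + 1) t.1 t.2.1 (ACTUATOR_PLURAL.getD t.2.2 t.2.2) := by
      have hc : ((2 * ts.length + 1 : Nat) : Int) = 2 * m + 1 := by push_cast; ring
      have := oiText_rest station ts t
      rwa [hc] at this
    by_cases hcase : 2 * m < 96
    · -- both inserted keys are still inside the 96 reserved fields: overwrite in place
      have hE : 2 * m ≤ 94 := by omega
      unfold dictOf
      rw [show max (96:Int) (2 * ((ts.length : Nat) : Int)) = 96 by omega,
        show max (96:Int) (2 * (((ts ++ [t]).length : Nat) : Int)) = 96 by rw [hlen]; omega]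
      rw [insert_map_range _ 96 (2 * m) (by omega) (by omega),
        insert_map_range _ 96 (2 * m + 1) (by omega) (by omega)]
      apply PySem.Dict.ext
      show List.map _ _ = List.map _ _
      apply List.map_congr_left
      intro j hj
      rw [PySem.List.mem_pyRange_one] at hj
      obtain ⟨k, rfl⟩ := Int.eq_ofNat_of_zero_le hj.1
      by_cases h1 : (k : Int) = 2 * m + 1
      · rw [if_pos h1, h1, hr]
      · rw [if_neg h1]
        by_cases h2 : (k : Int) = 2 * m
        · rw [if_pos h2, h2, hw]
        · rw [if_neg h2]
          by_cases h3 : (k : Int) < 2 * m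
          · exact congrArg (fun s => ((k : Int), s)) (oiText_lt station ts t k (by omega)).symm
          · rw [oiText_ge station ts m (k : Int) (by omega),
              oiText_ge station (ts ++ [t]) ((ts ++ [t]).length : Int) (k : Int)
                (by rw [hlen]; omega)]
    · -- the reserved fields are exhausted: both inserts append new keys at the end
      have h96 : (96:Int) ≤ 2 * m := by omega
      unfold dictOf
      rw [show max (96:Int) (2 * ((ts.length : Nat) : Int)) = 2 * m by omega,
        show max (96:Int) (2 * (((ts ++ [t]).length : Nat) : Int)) = 2 * m + 2 by rw [hlen]; omega]
      rw [insert_map_range_top]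
      apply PySem.Dict.ext
      have hc2 : (PySem.Dict.mk ((PySem.List.pyRange 0 (2 * m) 1).map
          (fun j => (j, oiText station ts m j)) ++
            [(2 * m, workComment station (2 * m) t.1 t.2.1 (ACTUATOR_PLURAL.getD t.2.2 t.2.2))])).contains
          (2 * m + 1) = false := by
        rw [PySem.Dict.contains_mk]
        rw [List.any_eq_false]
        intro p hp
        rcases List.mem_append.mp hp with hp1 | hp2
        · obtain ⟨j, hj, rfl⟩ := List.mem_map.mp hp1
          rw [PySem.List.mem_pyRange_one] at hj
          exact fun h => (show j ≠ 2 * m + 1 from by omega) (beq_iff_eq.mp h)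
        · rw [List.mem_singleton] at hp2
          subst hp2
          exact fun h => (show (2 * m : Int) ≠ 2 * m + 1 from by omega) (beq_iff_eq.mp h)
      rw [PySem.Dict.items_insert_of_not_contains _ _ hc2]
      show _ = List.map _ (PySem.List.pyRange 0 (2 * m + 2) 1)
      rw [show (2:Int) * m + 2 = (2 * m + 1) + 1 by ring,
        PySem.List.pyRange_one_succ_right (by omega),
        PySem.List.pyRange_one_succ_right (by omega),
        List.map_append, List.map_append]
      simp only [List.map_cons, List.map_nil]
      rw [hw, hr]
      have hmain : List.map (fun j => (j, oiText station (ts ++ [t]) ((ts ++ [t]).length : Int) j))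
            (PySem.List.pyRange 0 (2 * m) 1)
          = List.map (fun j => (j, oiText station ts m j)) (PySem.List.pyRange 0 (2 * m) 1) := by
        apply List.map_congr_left
        intro j hj
        rw [PySem.List.mem_pyRange_one] at hj
        obtain ⟨k, rfl⟩ := Int.eq_ofNat_of_zero_le hj.1
        exact congrArg (fun s => ((k : Int), s)) (oiText_lt station ts t k (by omega))
      rw [hmain]

lemma ports_eq (station : String) (cfg : List (List (List (String × String)))) :
    auto_gen_oi station cfg = auto_gen_oi_alt station cfg := by
  show ((PySem.List.enumerate cfg 1).foldl
      (fun st isl => (PySem.List.enumerate isl.2 1).foldl (innerStepA station isl.1) st)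
      (make_reserve_dict 0 95, 0)).1.items
    = (PySem.List.pyRange 0 (max 96 (2 * ((oiTriples cfg).length : Int))) 1).map
        (fun idx => (idx, oiText station (oiTriples cfg) ((oiTriples cfg).length : Int) idx))
  rw [flatten_fold, main_fold]
  rfl

-- ===== VERDICT (by name: the statement is the Claim_ definition above) =====
theorem auto_gen_oi_spec : Claim_equal_auto_gen_oi := by
  intro station cfg _ _
  exact ports_eq station cfg
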